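-- pv_equiv track=rewrite | github.com/Matthew-J-Walsh/FactorioConstructsAndPricing | sparsetensors.py | einsum_output_subscript
-- ===== SOURCE A (Python) =====
-- def einsum_output_subscript(input_subscripts):
--     """
--     Caculates the expected einstein summation output subscripts
--     following notational standards.
--     """
--     output_subscript = []
--     for sub in input_subscripts:
--         for l in sub:
--             if l in output_subscript:
--                 output_subscript.remove(l)
--             else:
--                 output_subscript.append(l)
--     return "".join(output_subscript)
-- ===== SOURCE B (Python) =====
-- def einsum_output_subscript(input_subscripts):
--     s = "".join(input_subscripts)
--     odd = [c for c in set(s) if s.count(c) % 2 == 1]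
--     odd.sort(key=s.rfind)
--     return "".join(odd)
-- ===== Notes on version B (the rewrite author's own statement) =====
-- stated objective: faster
-- what changed: A toggles each letter in/out of a list with linear membership tests and list.remove per character (O(n*k)); B joins the input once and computes the same answer as set/str.count/sort-by-str.rfind bulk operations: the odd-count letters sorted by last occurrence.
import Mathlib
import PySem

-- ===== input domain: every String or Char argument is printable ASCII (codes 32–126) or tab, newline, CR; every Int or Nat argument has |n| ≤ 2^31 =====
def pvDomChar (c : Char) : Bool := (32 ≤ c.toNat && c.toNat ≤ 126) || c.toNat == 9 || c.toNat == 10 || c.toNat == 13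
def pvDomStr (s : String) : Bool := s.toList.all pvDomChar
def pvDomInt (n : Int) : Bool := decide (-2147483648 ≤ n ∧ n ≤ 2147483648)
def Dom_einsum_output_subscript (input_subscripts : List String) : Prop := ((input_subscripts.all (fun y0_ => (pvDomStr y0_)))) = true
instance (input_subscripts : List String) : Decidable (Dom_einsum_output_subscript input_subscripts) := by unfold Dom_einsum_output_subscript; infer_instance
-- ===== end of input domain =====

-- B replaces A's toggle-list (membership test + list.remove per character) by bulk string
-- operations: the odd-count letters (set/count) sorted by last occurrence (rfind).

-- ===== PORT A =====
def einsum_output_subscript (input_subscripts : List String) : String :=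
  String.ofList   -- "".join of a list of single characters
    (input_subscripts.foldl (fun out sub =>
      sub.toList.foldl (fun out l =>
        if out.contains l then
          (PySem.List.remove? out l).getD out   -- list.remove; guarded by the membership test, so remove? is `some` here
        else out ++ [l]) out) [])

-- ===== PORT B =====
-- s.rfind(c), ported by hand: the highest index of c in s (or -1); exact for a
-- single-character needle (it is s.length - 1 - (position of c in reversed s))
def pvRfind (s : List Char) (c : Char) : Int :=
  if c ∈ s then (s.length : Int) - 1 - (s.reverse.idxOf c : Int) else -1

def einsum_output_subscript_alt (input_subscripts : List String) : String :=
  let s := (input_subscripts.map String.toList).flatten   -- "".join(input_subscripts), exact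
  -- [c for c in set(s) if s.count(c) % 2 == 1]; s.count with a 1-char needle is the char count;
  -- the set's iteration order is made irrelevant by the injective-key sort below
  let odd := (PySem.Set.ofList s).filter (fun c => s.count c % 2 == 1)
  String.ofList (PySem.List.sorted odd (fun c => pvRfind s c))   -- odd.sort(key=s.rfind); "".join(odd)

-- ===== PRECONDITION & SPEC =====
def Spec_einsum_output_subscript (input_subscripts : List String) (out : String) : Prop := out = einsum_output_subscript_alt input_subscripts
instance (input_subscripts : List String) (out : String) : Decidable (Spec_einsum_output_subscript input_subscripts out) := by unfold Spec_einsum_output_subscript; infer_instance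

-- ===== CLAIM (what is proved, stated in full; the proofs are below) =====
def Claim_equal_einsum_output_subscript : Prop := ∀ (input_subscripts : List String), Dom_einsum_output_subscript input_subscripts → Spec_einsum_output_subscript input_subscripts (einsum_output_subscript input_subscripts)

-- ===== LEMMAS AND PROOFS =====

-- first occurrences of a char list, skipping chars satisfying S (proof-only helper)
def pvFirsts (S : Char → Bool) : List Char → List Char
  | [] => []
  | c :: r => if S c then pvFirsts S r else c :: pvFirsts (fun x => S x || (x == c)) r

lemma pvFirsts_not_mem (r : List Char) : ∀ (S : Char → Bool) (x : Char), S x = true → x ∉ pvFirsts S r := by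
  induction r with
  | nil => intro S x _; simp [pvFirsts]
  | cons c r ih =>
    intro S x hx
    simp only [pvFirsts]
    split
    · exact ih S x hx
    · intro hmem
      rcases List.mem_cons.mp hmem with h | h
      · subst h; simp_all
      · exact ih _ x (by simp [hx]) h

lemma pvFirsts_mem (r : List Char) : ∀ (S : Char → Bool) (x : Char), x ∈ pvFirsts S r ↔ (S x = false ∧ x ∈ r) := by
  induction r with
  | nil => intro S x; simp [pvFirsts]
  | cons c r ih =>
    intro S x
    simp only [pvFirsts]
    split
    · rename_i hSc
      rw [ih]
      constructor
      · rintro ⟨h1, h2⟩; exact ⟨h1, List.mem_cons_of_mem _ h2⟩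
      · rintro ⟨h1, h2⟩
        rcases List.mem_cons.mp h2 with h | h
        · subst h; simp_all
        · exact ⟨h1, h⟩
    · rename_i hSc
      simp only [Bool.not_eq_true] at hSc
      constructor
      · intro hmem
        rcases List.mem_cons.mp hmem with h | h
        · subst h; simp [hSc]
        · have := (ih _ x).mp h
          rcases this with ⟨h1, h2⟩
          simp only [Bool.or_eq_false_iff] at h1
          exact ⟨h1.1, List.mem_cons_of_mem _ h2⟩
      · rintro ⟨h1, h2⟩
        by_cases hxc : x = c
        · subst hxc; exact List.mem_cons_self
        · rcases List.mem_cons.mp h2 with h | h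
          · exact absurd h hxc
          · exact List.mem_cons_of_mem _ ((ih _ x).mpr ⟨by simp [h1, hxc], h⟩)

lemma pvFirsts_nodup (r : List Char) : ∀ (S : Char → Bool), (pvFirsts S r).Nodup := by
  induction r with
  | nil => intro S; simp [pvFirsts]
  | cons c r ih =>
    intro S
    simp only [pvFirsts]
    split
    · exact ih S
    · refine List.nodup_cons.mpr ⟨?_, ih _⟩
      exact pvFirsts_not_mem r _ c (by simp)

lemma pvFirsts_exclude (r : List Char) : ∀ (S : Char → Bool) (c : Char),
    pvFirsts (fun x => S x || (x == c)) r = (pvFirsts S r).filter (fun x => x != c) := by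
  induction r with
  | nil => intro S c; simp [pvFirsts]
  | cons d r ih =>
    intro S c
    simp only [pvFirsts]
    by_cases hSd : S d = true
    · rw [if_pos (by simp [hSd]), if_pos hSd, ih]
    · simp only [Bool.not_eq_true] at hSd
      by_cases hdc : d = c
      · subst hdc
        rw [if_pos (by simp), if_neg (by simp [hSd]), List.filter_cons_of_neg (by simp)]
        exact (List.filter_eq_self.mpr (fun x hx => by
          have := (pvFirsts_mem r _ x).mp hx
          simp only [Bool.or_eq_false_iff] at this
          simpa using this.1.2)).symm
      · rw [if_neg (by simp [hSd, hdc]), if_neg (by simp [hSd]),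
          List.filter_cons_of_pos (by simp [hdc]), ← ih]
        have hcomm : (fun x => (S x || (x == c)) || (x == d))
            = (fun x => (S x || (x == d)) || (x == c)) := by
          funext x
          cases hS : S x <;> cases h1 : x == c <;> cases h2 : x == d <;> simp
        rw [hcomm]

-- canonical value: odd-count letters in order of last occurrence
def pvCanon (l : List Char) : List Char :=
  ((pvFirsts (fun _ => false) l.reverse).filter (fun c => l.count c % 2 == 1)).reverse

lemma pvCanon_nodup (l : List Char) : (pvCanon l).Nodup := by
  unfold pvCanon
  exact List.nodup_reverse.mpr ((pvFirsts_nodup _ _).filter _)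

-- A's nested loop over strings is the loop over the flattened char list
lemma pv_foldl_flatten (f : List Char → Char → List Char) (ss : List String) :
    ∀ acc : List Char, ss.foldl (fun out sub => sub.toList.foldl f out) acc
      = ((ss.map String.toList).flatten).foldl f acc := by
  induction ss with
  | nil => intro acc; simp
  | cons s ss ih => intro acc; simp [List.foldl_append, ih]

-- the canonical value satisfies A's step recurrence
lemma pvCanon_append (l : List Char) (c : Char) :
    pvCanon (l ++ [c]) =
      (if l.count c % 2 == 1 then (pvCanon l).erase c else pvCanon l ++ [c]) := by
  have hexc : pvFirsts (fun x => false || (x == c)) l.reverse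
      = (pvFirsts (fun _ => false) l.reverse).filter (fun x => x != c) :=
    pvFirsts_exclude l.reverse (fun _ => false) c
  have hrev : (l ++ [c]).reverse = c :: l.reverse := by simp
  have hL : pvCanon (l ++ [c])
      = ((c :: (pvFirsts (fun _ => false) l.reverse).filter (fun x => x != c)).filter
          (fun x => (l ++ [c]).count x % 2 == 1)).reverse := by
    rw [show pvCanon (l ++ [c])
        = ((pvFirsts (fun _ => false) (l ++ [c]).reverse).filter
            (fun x => (l ++ [c]).count x % 2 == 1)).reverse from rfl, hrev,
      show pvFirsts (fun _ => false) (c :: l.reverse)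
        = c :: pvFirsts (fun x => false || (x == c)) l.reverse from rfl, hexc]
  have hcount1 : (l ++ [c]).count c = l.count c + 1 := by simp
  have hfilter :
      ((pvFirsts (fun _ => false) l.reverse).filter (fun x => x != c)).filter
          (fun x => (l ++ [c]).count x % 2 == 1)
      = ((pvFirsts (fun _ => false) l.reverse).filter (fun x => l.count x % 2 == 1)).filter
          (fun x => x != c) := by
    rw [List.filter_filter, List.filter_filter]
    congr 1
    funext x
    by_cases h : x = c
    · subst h; simp
    · have h0 : List.count x [c] = 0 := List.count_eq_zero.mpr (by simp [h])
      have hcx : (l ++ [c]).count x = l.count x := by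
        rw [List.count_append, h0]
        omega
      rw [hcx, Bool.and_comm]
  by_cases hodd : l.count c % 2 = 1
  · have hcnew : ((l ++ [c]).count c % 2 == 1) = false := by
      rw [hcount1, beq_eq_false_iff_ne]; omega
    rw [hL, List.filter_cons_of_neg (by intro h; rw [hcnew] at h; simp at h), hfilter,
      if_pos (by simpa using hodd), (pvCanon_nodup l).erase_eq_filter,
      show pvCanon l = ((pvFirsts (fun _ => false) l.reverse).filter
        (fun x => l.count x % 2 == 1)).reverse from rfl, ← List.filter_reverse]
  · have hcnew : ((l ++ [c]).count c % 2 == 1) = true := by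
      rw [hcount1, beq_iff_eq]; omega
    have hnot : c ∉ (pvFirsts (fun _ => false) l.reverse).filter
        (fun x => l.count x % 2 == 1) := by
      intro h
      have := List.of_mem_filter h
      rw [beq_iff_eq] at this
      omega
    rw [hL, List.filter_cons_of_pos (p := fun x => List.count x (l ++ [c]) % 2 == 1) hcnew, hfilter,
      List.filter_eq_self.mpr (fun x hx => by
        rw [bne_iff_ne]; rintro rfl; exact hnot hx),
      if_neg (by simpa using hodd), List.reverse_cons,
      show pvCanon l = ((pvFirsts (fun _ => false) l.reverse).filter
        (fun x => l.count x % 2 == 1)).reverse from rfl]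

-- A's toggle loop computes the canonical value
lemma pv_toggle_eq_canon (l : List Char) :
    l.foldl (fun out c =>
      if out.contains c then (PySem.List.remove? out c).getD out else out ++ [c]) []
    = pvCanon l := by
  induction l using List.reverseRecOn with
  | nil => simp [pvCanon, pvFirsts]
  | append_singleton l c ih =>
    rw [List.foldl_append, List.foldl_cons, List.foldl_nil, ih, pvCanon_append]
    by_cases hmem : c ∈ pvCanon l
    · have hcont : (pvCanon l).contains c = true := List.elem_eq_true_of_mem hmem
      have hodd : l.count c % 2 = 1 := by
        have hmem' := hmem
        unfold pvCanon at hmem'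
        have := List.of_mem_filter (List.mem_reverse.mp hmem')
        simpa using this
      rw [if_pos hcont, PySem.List.remove?_eq_some_erase _ _ hmem]
      simp [hodd]
    · have hcont : (pvCanon l).contains c = false := by
        simp only [List.contains_eq_mem, decide_eq_false_iff_not]; exact hmem
      have heven : ¬ (l.count c % 2 = 1) := by
        intro hodd
        apply hmem
        unfold pvCanon
        rw [List.mem_reverse]
        apply List.mem_filter.mpr
        refine ⟨(pvFirsts_mem _ _ _).mpr ⟨rfl, ?_⟩, by simpa using hodd⟩
        rw [List.mem_reverse]
        exact List.count_pos_iff.mp (by omega)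
      rw [if_neg (by rw [hcont]; simp)]
      simp [heven]

-- ===== B-side lemmas =====
lemma pv_count_nodup {l : List Char} (h : l.Nodup) (a : Char) :
    l.count a = if a ∈ l then 1 else 0 := by
  split
  · have h1 := (List.nodup_iff_count_le_one.mp h) a
    have h2 := List.count_pos_iff.mpr ‹a ∈ l›
    omega
  · exact List.count_eq_zero.mpr ‹_›

lemma pv_mem_pvCanon (s : List Char) (x : Char) :
    x ∈ pvCanon s ↔ (x ∈ s ∧ (s.count x % 2 == 1) = true) := by
  unfold pvCanon
  rw [List.mem_reverse, List.mem_filter, pvFirsts_mem]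
  simp [List.mem_reverse]

lemma pv_perm (s : List Char) :
    (pvCanon s).Perm ((PySem.Set.ofList s).filter (fun c => s.count c % 2 == 1)) := by
  apply List.perm_iff_count.mpr
  intro a
  rw [pv_count_nodup (pvCanon_nodup s), pv_count_nodup ((PySem.Set.nodup_ofList s).filter _)]
  have hiff : a ∈ pvCanon s ↔ a ∈ (PySem.Set.ofList s).filter (fun c => s.count c % 2 == 1) := by
    rw [pv_mem_pvCanon, List.mem_filter, PySem.Set.mem_ofList]
  by_cases hmem : a ∈ pvCanon s
  · rw [if_pos hmem, if_pos (hiff.mp hmem)]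
  · rw [if_neg hmem, if_neg (fun h => hmem (hiff.mpr h))]

-- elements of pvFirsts appear in order of their first occurrence in r
lemma pvFirsts_pairwise (r : List Char) : ∀ (S : Char → Bool),
    (pvFirsts S r).Pairwise (fun a b => r.idxOf a < r.idxOf b) := by
  induction r with
  | nil => intro S; simp [pvFirsts]
  | cons c r ih =>
    intro S
    simp only [pvFirsts]
    split
    · rename_i hSc
      refine List.Pairwise.imp_of_mem ?_ (ih S)
      intro a b ha hb hab
      have hane : a ≠ c := fun h => by
        subst h
        have := ((pvFirsts_mem r S a).mp ha).1
        simp_all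
      have hbne : b ≠ c := fun h => by
        subst h
        have := ((pvFirsts_mem r S b).mp hb).1
        simp_all
      rw [List.idxOf_cons_ne _ (Ne.symm hane), List.idxOf_cons_ne _ (Ne.symm hbne)]
      omega
    · refine List.pairwise_cons.mpr ⟨?_, ?_⟩
      · intro b hb
        have hbne : b ≠ c := fun h => by
          subst h
          have := ((pvFirsts_mem r _ b).mp hb).1
          simp_all
        rw [List.idxOf_cons_self, List.idxOf_cons_ne _ (Ne.symm hbne)]
        omega
      · refine List.Pairwise.imp_of_mem ?_ (ih _)
        intro a b ha hb hab
        have hane : a ≠ c := fun h => by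
          subst h
          have := ((pvFirsts_mem r _ a).mp ha).1
          simp_all
        have hbne : b ≠ c := fun h => by
          subst h
          have := ((pvFirsts_mem r _ b).mp hb).1
          simp_all
        rw [List.idxOf_cons_ne _ (Ne.symm hane), List.idxOf_cons_ne _ (Ne.symm hbne)]
        omega

lemma pvCanon_pairwise (s : List Char) :
    (pvCanon s).Pairwise (fun a b => pvRfind s a < pvRfind s b) := by
  unfold pvCanon
  rw [List.pairwise_reverse]
  refine List.Pairwise.imp_of_mem ?_ ((pvFirsts_pairwise s.reverse _).filter _)
  intro a b ha hb hab
  have hamem : a ∈ s := by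
    have := ((pvFirsts_mem s.reverse _ a).mp (List.mem_of_mem_filter ha)).2
    rwa [List.mem_reverse] at this
  have hbmem : b ∈ s := by
    have := ((pvFirsts_mem s.reverse _ b).mp (List.mem_of_mem_filter hb)).2
    rwa [List.mem_reverse] at this
  unfold pvRfind
  rw [if_pos hamem, if_pos hbmem]
  omega

-- B computes the canonical value
lemma pv_alt_eq_canon (xs : List String) :
    einsum_output_subscript_alt xs
      = String.ofList (pvCanon ((xs.map String.toList).flatten)) := by
  unfold einsum_output_subscript_alt
  simp only []
  rw [PySem.List.sorted_eq_of_perm_of_pairwise_lt _ _ _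
    (pv_perm ((xs.map String.toList).flatten))
    (pvCanon_pairwise ((xs.map String.toList).flatten))]

-- ===== VERDICT (by name: the statement is the Claim_ definition above) =====
theorem einsum_output_subscript_spec : Claim_equal_einsum_output_subscript := by
  intro input_subscripts _
  unfold Spec_einsum_output_subscript
  rw [pv_alt_eq_canon]
  unfold einsum_output_subscript
  rw [pv_foldl_flatten, pv_toggle_eq_canon]
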